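-- pv_equiv track=rewrite | github.com/ChickenHawkXP/PDF-Parsing | main.py | fixtown
-- ===== SOURCE A (Python) =====
-- def fixtown(townlist):
--     for i in range(len(townlist)):
--         try:
--             if townlist[i] == "North ":
--                 townlist[i] = townlist[i] + townlist[i+1]
--                 townlist.pop(i+1)
--         except IndexError:
--             break
--     return townlist
-- ===== SOURCE B (Python) =====
-- def fixtown(townlist):
--     out = []
--     i, n = 0, len(townlist)
--     while i < n:
--         if townlist[i] == "North " and i + 1 < n:
--             out.append(townlist[i] + townlist[i + 1])
--             i += 2
--         else:
--             out.append(townlist[i])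
--             i += 1
--     townlist[:] = out
--     return townlist
-- ===== Notes on version B (the rewrite author's own statement) =====
-- stated objective: alternative
-- what changed: Replaces A's in-place merge loop that mutates and shrinks the list with pop(i+1) (catching IndexError to stop) by a single read-ahead pass over the unchanged input that appends to a fresh accumulator and assigns it back with townlist[:] = out, preserving the in-place mutation of the argument.
import Mathlib
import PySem

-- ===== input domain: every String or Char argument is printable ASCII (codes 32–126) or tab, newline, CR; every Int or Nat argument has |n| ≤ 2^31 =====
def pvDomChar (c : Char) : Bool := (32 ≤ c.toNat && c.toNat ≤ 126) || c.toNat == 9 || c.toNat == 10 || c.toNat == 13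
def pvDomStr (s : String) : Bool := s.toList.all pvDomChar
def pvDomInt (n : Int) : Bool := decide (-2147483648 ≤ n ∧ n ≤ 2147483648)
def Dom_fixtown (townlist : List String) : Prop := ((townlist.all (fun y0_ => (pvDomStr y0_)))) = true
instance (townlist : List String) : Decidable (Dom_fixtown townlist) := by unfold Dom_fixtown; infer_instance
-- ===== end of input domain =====

-- B replaces A's merge-with-pop(i+1) loop over a shrinking list by a single read-ahead pass
-- that appends merged tokens to a fresh list and assigns it back in place (townlist[:] = out),
-- so the argument is mutated exactly as A mutates it; equivalence is about the returned value.

-- ===== PORT A =====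
-- for i in range(len(townlist)) with try/except IndexError: break; pop(i+1) after the
-- in-place merge.  The for-loop with break is the recursion below: a caught IndexError
-- (an out-of-range townlist[i] or townlist[i+1]) returns the current list.
def fixtownLoopA (lst : List String) (n i : Nat) : List String :=
  if _h : i < n then
    match lst[i]? with
    | none => lst                                   -- townlist[i] raised IndexError → break
    | some x =>
      if x = "North " then
        match lst[i+1]? with
        | none => lst                               -- townlist[i+1] raised IndexError → break
        | some y => fixtownLoopA ((lst.set i (x ++ y)).eraseIdx (i+1)) n (i+1)
      else fixtownLoopA lst n (i+1)
  else lst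
termination_by n - i
decreasing_by all_goals omega

def fixtown (townlist : List String) : List String :=
  fixtownLoopA townlist townlist.length 0

-- ===== PORT B =====
-- while i < n building out by append; townlist[:] = out does not change the return value.
def fixtownLoopB (ts : List String) (n i : Nat) (out : List String) : List String :=
  if _h : i < n then
    if ts.getD i "" = "North " ∧ i + 1 < n then
      fixtownLoopB ts n (i+2) (out ++ [ts.getD i "" ++ ts.getD (i+1) ""])
    else
      fixtownLoopB ts n (i+1) (out ++ [ts.getD i ""])
  else out
termination_by n - i
decreasing_by all_goals omega

def fixtown_alt (townlist : List String) : List String :=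
  fixtownLoopB townlist townlist.length 0 []

-- ===== PRECONDITION & SPEC =====
def Spec_fixtown (townlist : List String) (out : List String) : Prop := out = fixtown_alt townlist
instance (townlist : List String) (out : List String) : Decidable (Spec_fixtown townlist out) := by unfold Spec_fixtown; infer_instance

-- ===== CLAIM (what is proved, stated in full; the proofs are below) =====
def Claim_equal_fixtown : Prop := ∀ (townlist : List String), Dom_fixtown townlist → Spec_fixtown townlist (fixtown townlist)

-- ===== LEMMAS AND PROOFS =====

-- reference function: the merged list, by structural recursion
def pvCompact : List String → List String
  | [] => []
  | [x] => [x]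
  | x :: y :: r => if x = "North " then (x ++ y) :: pvCompact r else x :: pvCompact (y :: r)

lemma pv_setErase (out : List String) (a x y : String) (r : List String) :
    ((out ++ x :: y :: r).set out.length a).eraseIdx (out.length + 1) = out ++ a :: r := by
  induction out with
  | nil => simp
  | cons h t ih => simpa using ih

lemma pv_get_append (out rest : List String) (k : Nat) :
    (out ++ rest)[out.length + k]? = rest[k]? := by
  rw [List.getElem?_append_right (Nat.le_add_right _ _)]
  congr 1
  omega

lemma fixtownLoopA_eq (n : Nat) (rest : List String) : ∀ out : List String,
    out.length + rest.length ≤ n →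
    fixtownLoopA (out ++ rest) n out.length = out ++ pvCompact rest := by
  induction rest using pvCompact.induct with
  | case1 =>
    intro out hle
    unfold fixtownLoopA
    split
    · simp [pvCompact]
    · simp [pvCompact]
  | case2 x =>
    intro out hle
    have hi : out.length < n := by simp at hle; omega
    have h0 : (out ++ [x])[out.length]? = some x := by
      simpa using pv_get_append out [x] 0
    have h1 : (out ++ [x])[out.length + 1]? = none := by
      simpa using pv_get_append out [x] 1
    unfold fixtownLoopA
    rw [dif_pos hi]
    by_cases hx : x = "North "
    · simp only [h0, h1, if_pos hx]
      simp [pvCompact]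
    · simp only [h0, if_neg hx]
      -- one more step: at index out.length + 1 the list is exhausted
      unfold fixtownLoopA
      split
      · simp only [h1]
        simp [pvCompact]
      · simp [pvCompact]
  | case3 y r ih =>
    intro out hle
    have hi : out.length < n := by simp at hle; omega
    have h0 : (out ++ "North " :: y :: r)[out.length]? = some "North " := by
      simpa using pv_get_append out ("North " :: y :: r) 0
    have h1 : (out ++ "North " :: y :: r)[out.length + 1]? = some y := by
      simpa using pv_get_append out ("North " :: y :: r) 1
    unfold fixtownLoopA
    rw [dif_pos hi]
    simp only [h0, h1, pv_setErase]
    have := ih (out ++ ["North " ++ y]) (by simp at hle ⊢; omega)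
    simp only [List.length_append, List.length_cons, List.append_assoc, List.cons_append,
      List.nil_append, List.length_nil] at this ⊢
    simpa [pvCompact, Nat.add_comm] using this
  | case4 x y r hx ih =>
    intro out hle
    have hi : out.length < n := by simp at hle; omega
    have h0 : (out ++ x :: y :: r)[out.length]? = some x := by
      simpa using pv_get_append out (x :: y :: r) 0
    unfold fixtownLoopA
    rw [dif_pos hi]
    simp only [h0, if_neg hx]
    have := ih (out ++ [x]) (by simp at hle ⊢; omega)
    simp only [List.length_append, List.length_cons, List.append_assoc, List.cons_append,
      List.nil_append, List.length_nil] at this ⊢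
    simpa [pvCompact, hx, Nat.add_comm] using this

lemma fixtownLoopB_eq (ts : List String) (n i : Nat) (out : List String) (hn : n = ts.length) :
    fixtownLoopB ts n i out = out ++ pvCompact (ts.drop i) := by
  induction i, out using fixtownLoopB.induct (ts := ts) (n := n) with
  | case1 i out hi hcond ih =>
    -- merge branch: ts.getD i "" = "North " and i+1 < n
    subst hn
    obtain ⟨hx, hi1⟩ := hcond
    have e1 : ts.drop i = ts[i] :: ts.drop (i+1) := List.drop_eq_getElem_cons hi
    have e2 : ts.drop (i+1) = ts[i+1] :: ts.drop (i+2) := List.drop_eq_getElem_cons hi1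
    have g1 : ts[i]? = some ts[i] := List.getElem?_eq_getElem hi
    have g2 : ts[i+1]? = some ts[i+1] := List.getElem?_eq_getElem hi1
    rw [fixtownLoopB, dif_pos hi, if_pos ⟨hx, hi1⟩, ih, e1, e2]
    simp only [List.getD_eq_getElem?_getD, g1, Option.getD_some] at hx
    simp [pvCompact, hx, g1, g2]
  | case2 i out hi hcond ih =>
    subst hn
    have e1 : ts.drop i = ts[i] :: ts.drop (i+1) := List.drop_eq_getElem_cons hi
    have g1 : ts[i]? = some ts[i] := List.getElem?_eq_getElem hi
    rw [fixtownLoopB, dif_pos hi, if_neg hcond, ih, e1]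
    by_cases hi1 : i + 1 < ts.length
    · have hx : ¬ ts[i] = "North " := by
        intro h; exact hcond ⟨by simp [g1, h], hi1⟩
      have e2 : ts.drop (i+1) = ts[i+1] :: ts.drop (i+2) := List.drop_eq_getElem_cons hi1
      rw [e2]
      simp [pvCompact, hx, g1, ← e2]
    · have e2 : ts.drop (i+1) = [] := List.drop_eq_nil_of_le (by omega)
      rw [e2]
      simp [pvCompact, g1]
  | case3 i out hi =>
    subst hn
    have : ts.drop i = [] := List.drop_eq_nil_of_le (by omega)
    rw [fixtownLoopB, dif_neg hi, this]
    simp [pvCompact]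

-- ===== VERDICT (by name: the statement is the Claim_ definition above) =====
theorem fixtown_spec : Claim_equal_fixtown := by
  intro townlist _
  show fixtown townlist = fixtown_alt townlist
  have ha := fixtownLoopA_eq townlist.length townlist [] (by simp)
  have hb := fixtownLoopB_eq townlist townlist.length 0 [] rfl
  simp only [List.nil_append, List.length_nil, List.drop_zero] at ha hb
  rw [fixtown, fixtown_alt, ha, hb]
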